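-- pv_equiv track=rewrite | github.com/remster85/Python | Hacker_Rank_Contests/WeekOfCode32/FightTheMonsters.py | getMaxMonsters
-- ===== SOURCE A (Python) =====
-- def getMaxMonsters(n, hit, t, h):
--     numberOfSeconds = 0
--     numberOfMonsterKilled = 0
--
--     while numberOfSeconds < t:
--         h.sort()
--         h[0] -= hit
--         if h[0] <= 0:
--             numberOfMonsterKilled += 1
--             h.pop(0)
--         numberOfSeconds += 1
--     return numberOfMonsterKilled
-- ===== SOURCE B (Python) =====
-- # B: instead of simulating t seconds (re-sorting every second), compute each
-- # monster's kill time in closed form -- one second per hit, ceil(health/hit)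
-- # hits and at least one -- then walk the sorted kill times once and count how
-- # many fit in t seconds.  Does not mutate h (A sorts/pops it in place).
-- def getMaxMonsters(n, hit, t, h):
--     killed = 0
--     for cost in (max(1, -(-x // hit)) for x in sorted(h)):
--         if cost > t:
--             break
--         t -= cost
--         killed += 1
--     return killed
-- ===== Notes on version B (the rewrite author's own statement) =====
-- stated objective: faster
-- what changed: A simulates every second, re-sorting the list and subtracting hit from the weakest monster each iteration; B computes each monster's kill time in closed form (one second per hit, ceil(health/hit) hits and at least one) and walks the sorted kill times once, counting how many fit in t seconds; Pre_ restricts to the natural domain hit >= 1 (on non-positive hit no monster can be damaged and A's value is an accident of its simulation) and excludes the inputs where A raises IndexError (all monsters dead strictly before t seconds run out).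
-- outside the precondition, e.g. on getMaxMonsters(1, -2, 3, [5]): A returns 0, B returns 1
import Mathlib
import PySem

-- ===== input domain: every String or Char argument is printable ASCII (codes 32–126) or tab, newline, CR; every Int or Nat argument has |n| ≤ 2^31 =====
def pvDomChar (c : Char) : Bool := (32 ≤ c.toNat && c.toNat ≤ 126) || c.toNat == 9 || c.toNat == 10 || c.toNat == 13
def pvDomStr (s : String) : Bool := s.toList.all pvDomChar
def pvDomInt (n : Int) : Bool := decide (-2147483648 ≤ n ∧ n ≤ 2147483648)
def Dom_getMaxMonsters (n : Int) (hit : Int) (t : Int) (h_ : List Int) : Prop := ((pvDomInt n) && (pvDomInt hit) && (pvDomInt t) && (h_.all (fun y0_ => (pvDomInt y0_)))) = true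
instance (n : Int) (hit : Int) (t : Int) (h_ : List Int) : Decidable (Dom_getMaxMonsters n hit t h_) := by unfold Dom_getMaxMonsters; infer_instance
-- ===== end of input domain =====

-- B replaces A's second-by-second simulation (re-sorting every second) by closed-form
-- per-monster kill times walked once along the sorted list (asymptotically faster);
-- NOTE: A sorts/pops the caller's list h in place, B does not mutate it — the
-- equivalence proved is about the return value.

-- ===== PORT A =====
-- one iteration of A's while-loop per unit of fuel (fuel = number of seconds, t.toNat);
-- when the list is empty Python raises IndexError on h[0] (excluded by Pre_): the port
-- returns the kill count accumulated so far there.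
def pvRunA (hit : Int) : Nat → List Int → Int → Int
  | 0, _, killed => killed
  | f + 1, h, killed =>
    match PySem.List.sorted h (fun x => x) false with   -- h.sort()
    | [] => killed                                       -- h[0] would raise IndexError
    | x :: rest =>
      if x - hit ≤ 0 then pvRunA hit f rest (killed + 1) -- h[0] -= hit; h[0] <= 0: kill, pop
      else pvRunA hit f ((x - hit) :: rest) killed       -- else keep the damaged monster

def getMaxMonsters (n : Int) (hit : Int) (t : Int) (h_ : List Int) : Int :=
  pvRunA hit t.toNat h_ 0

-- ===== PORT B =====
-- the for-loop of Source B: take sorted kill times while they fit into the remaining time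
def pvLoop : List Int → Int → Int → Int
  | [], _, killed => killed
  | c :: cs, t, killed =>
    if t < c then killed else pvLoop cs (t - c) (killed + 1)

def getMaxMonsters_alt (n : Int) (hit : Int) (t : Int) (h_ : List Int) : Int :=
  pvLoop ((PySem.List.sorted h_ (fun x => x) false).map
            (fun x => max 1 (-(PySem.Int.floordiv (-x) hit)))) t 0

-- ===== PRECONDITION & SPEC =====
-- seconds to kill a monster of health x: one second per hit, ceil(x/hit) hits, at least one
def pvCost (hit x : Int) : Int := max 1 (-(PySem.Int.floordiv (-x) hit))

-- Pre_ restricts to the problem's natural domain hit ≥ 1 (on non-positive hit no monster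
-- can be damaged and A's one-kill-per-second-of-already-dead-monsters value is an accident
-- of its simulation) and excludes the inputs where Python A raises IndexError (every
-- monster dies with strictly fewer than t seconds used, so h[0] indexes an empty list).
def Pre_getMaxMonsters (n : Int) (hit : Int) (t : Int) (h_ : List Int) : Prop :=
  0 < hit ∧ t ≤ (h_.map (pvCost hit)).sum
instance (n : Int) (hit : Int) (t : Int) (h_ : List Int) : Decidable (Pre_getMaxMonsters n hit t h_) := by unfold Pre_getMaxMonsters; infer_instance

def pvWitness_getMaxMonsters : Int × Int × Int × List Int := (3, 2, 4, [1, 5])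

def Spec_getMaxMonsters (n : Int) (hit : Int) (t : Int) (h_ : List Int) (out : Int) : Prop := out = getMaxMonsters_alt n hit t h_
instance (n : Int) (hit : Int) (t : Int) (h_ : List Int) (out : Int) : Decidable (Spec_getMaxMonsters n hit t h_ out) := by unfold Spec_getMaxMonsters; infer_instance

-- ===== CLAIM (what is proved, stated in full; the proofs are below) =====
def Claim_equal_getMaxMonsters : Prop := ∀ (n : Int) (hit : Int) (t : Int) (h_ : List Int), Dom_getMaxMonsters n hit t h_ → Pre_getMaxMonsters n hit t h_ → Spec_getMaxMonsters n hit t h_ (getMaxMonsters n hit t h_)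

-- ===== LEMMAS AND PROOFS =====

theorem pvCost_pos (hit x : Int) : 0 < pvCost hit x := by
  unfold pvCost; omega

theorem pvLoop_nonpos (cs : List Int) (t k : Int)
    (hc : ∀ c ∈ cs, 0 < c) (hr : t ≤ 0) : pvLoop cs t k = k := by
  cases cs with
  | nil => rfl
  | cons c cs =>
    have : 0 < c := hc c (List.mem_cons_self)
    simp only [pvLoop]
    rw [if_pos (by omega)]

theorem pvCost_of_le (hit x : Int) (hp : 0 < hit) (hx : x ≤ hit) : pvCost hit x = 1 := by
  have h := (PySem.Int.neg_floordiv_neg_eq_iff_of_pos (a := x) (b := hit)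
    (q := -(PySem.Int.floordiv (-x) hit)) hp).mp rfl
  unfold pvCost
  by_cases h2 : 2 ≤ -(PySem.Int.floordiv (-x) hit)
  · exfalso
    have := mul_le_mul_of_nonneg_right
      (show (1:Int) ≤ -(PySem.Int.floordiv (-x) hit) - 1 by omega) (le_of_lt hp)
    linarith [h.1]
  · omega

theorem pvCost_of_gt (hit x : Int) (hp : 0 < hit) (hx : hit < x) :
    pvCost hit (x - hit) = pvCost hit x - 1 ∧ 2 ≤ pvCost hit x := by
  set c := -(PySem.Int.floordiv (-x) hit) with hc
  have h := (PySem.Int.neg_floordiv_neg_eq_iff_of_pos (a := x) (b := hit) (q := c) hp).mp rfl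
  have h2 : 2 ≤ c := by
    by_contra hcon
    have : c ≤ 1 := by omega
    have : c * hit ≤ 1 * hit := mul_le_mul_of_nonneg_right this (le_of_lt hp)
    omega
  have hceq : -(PySem.Int.floordiv (-(x - hit)) hit) = c - 1 := by
    rw [PySem.Int.neg_floordiv_neg_eq_iff_of_pos (a := x - hit) (b := hit) (q := c - 1) hp]
    constructor
    · nlinarith [h.1]
    · nlinarith [h.2]
  constructor
  · unfold pvCost
    rw [hceq, ← hc]
    omega
  · unfold pvCost
    rw [← hc]
    omega

-- head/tail facts about a sorted (key = id) list
theorem sorted_cons_facts (h : List Int) (x : Int) (rest : List Int)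
    (he : PySem.List.sorted h (fun y => y) false = x :: rest) :
    rest.Pairwise (· ≤ ·) ∧ (∀ y ∈ rest, x ≤ y) := by
  have hp : (PySem.List.sorted h (fun y => y) false).Pairwise (fun a b => a ≤ b) :=
    PySem.List.sorted_pairwise h (fun y => y)
  rw [he] at hp
  rw [List.pairwise_cons] at hp
  exact ⟨hp.2, hp.1⟩

-- A's simulation equals the prefix walk of the sorted kill-time list (hit > 0)
theorem runA_eq (hit : Int) (hp : 0 < hit) :
    ∀ (f : Nat) (h : List Int) (k : Int),
      pvRunA hit f h k
        = pvLoop ((PySem.List.sorted h (fun y => y) false).map (pvCost hit)) (f : Int) k := by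
  intro f
  induction f with
  | zero =>
    intro h k
    have hm : ∀ c ∈ (PySem.List.sorted h (fun y => y) false).map (pvCost hit), 0 < c := by
      intro c hc
      obtain ⟨y, _, rfl⟩ := List.mem_map.mp hc
      exact pvCost_pos hit y
    simp only [pvRunA, Nat.cast_zero]
    rw [pvLoop_nonpos _ _ _ hm (le_refl 0)]
  | succ f ih =>
    intro h k
    simp only [pvRunA]
    cases he : PySem.List.sorted h (fun y => y) false with
    | nil => simp [pvLoop]
    | cons x rest =>
      dsimp only
      obtain ⟨hrest, hx⟩ := sorted_cons_facts h x rest he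
      have hsrest : PySem.List.sorted rest (fun y => y) false = rest :=
        PySem.List.sorted_eq_self_of_pairwise rest (fun y => y) hrest
      by_cases hxh : x - hit ≤ 0
      · rw [if_pos hxh, ih rest (k + 1), hsrest]
        have hcx : pvCost hit x = 1 := pvCost_of_le hit x hp (by omega)
        simp only [List.map_cons, pvLoop, hcx]
        rw [if_neg (by push_cast; omega)]
        congr 1
        push_cast; ring
      · rw [if_neg hxh]
        have hgt : hit < x := by omega
        have hs2 : PySem.List.sorted ((x - hit) :: rest) (fun y => y) false
            = (x - hit) :: rest := by
          apply PySem.List.sorted_eq_self_of_pairwise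
          rw [List.pairwise_cons]
          exact ⟨fun y hy => by have := hx y hy; omega, hrest⟩
        rw [ih ((x - hit) :: rest) k, hs2]
        obtain ⟨hcd, hc2⟩ := pvCost_of_gt hit x hp hgt
        simp only [List.map_cons, pvLoop, hcd]
        by_cases hfit : (f : Int) < pvCost hit x - 1
        · rw [if_pos hfit, if_pos (by push_cast; omega)]
        · rw [if_neg hfit, if_neg (by push_cast; omega)]
          congr 1
          push_cast; ring

-- ===== VERDICT (by name: the statement is the Claim_ definition above) =====
theorem getMaxMonsters_spec : Claim_equal_getMaxMonsters := by
  intro n hit t h_ _ hpre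
  obtain ⟨hp, _⟩ := hpre
  unfold Spec_getMaxMonsters getMaxMonsters getMaxMonsters_alt
  by_cases ht : 0 ≤ t
  · have htn : ((t.toNat : Nat) : Int) = t := Int.toNat_of_nonneg ht
    rw [runA_eq hit hp t.toNat h_ 0, htn]
    rfl
  · have htn : t.toNat = 0 := Int.toNat_of_nonpos (by omega)
    rw [htn]
    simp only [pvRunA]
    have hm : ∀ c ∈ (PySem.List.sorted h_ (fun x => x) false).map
        (fun x => max 1 (-(PySem.Int.floordiv (-x) hit))), 0 < c := by
      intro c hc
      obtain ⟨y, _, rfl⟩ := List.mem_map.mp hc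
      exact pvCost_pos hit y
    rw [pvLoop_nonpos _ _ _ hm (by omega)]
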